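-- pv_equiv track=rewrite | github.com/aonanj/drawing-agent | src/training/build_dataset.py | canonical_fig_num
-- ===== SOURCE A (Python) =====
-- def canonical_fig_num(num: str | None) -> str:
--     """
--     Normalize figure identifiers to a canonical form:
--       - uppercase
--       - collapse internal spaces
--       - trim leading zeros on the numeric part (preserving a single zero)
--       - allow a single hyphen to denote ranges (e.g., 3-4)
--     Returns an empty string if the token is invalid.
--     """
--     if not num:
--         return ""
--     raw = num.strip().upper().replace(" ", "")
--     if not raw:
--         return ""
--     parts = raw.split("-")
--     if len(parts) > 2:
--         return ""
--     normalized_parts = []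
--     for part in parts:
--         if not part:
--             return ""
--         digits = []
--         suffix = []
--         in_suffix = False
--         for ch in part:
--             if ch.isdigit() and not in_suffix:
--                 digits.append(ch)
--                 continue
--             if ch.isalpha():
--                 in_suffix = True
--                 suffix.append(ch)
--                 continue
--             return ""
--         if not digits:
--             return ""
--         num_part = "".join(digits).lstrip("0") or "0"
--         if len(num_part) > 4 or len(suffix) > 2:
--             return ""
--         normalized_parts.append(num_part + "".join(suffix))
--     return "-".join(normalized_parts)
-- ===== SOURCE B (Python) =====
-- def _norm_part(part):
--     # boundary = index of first non-digit character
--     i = next((k for k, ch in enumerate(part) if not ch.isdigit()), len(part))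
--     head, tail = part[:i], part[i:]
--     if i == 0 or not all(ch.isalpha() for ch in tail):
--         return None
--     head = head.lstrip("0") or "0"
--     if len(head) > 4 or len(tail) > 2:
--         return None
--     return head + tail
--
--
-- def canonical_fig_num(num):
--     if not num:
--         return ""
--     raw = num.strip().upper().replace(" ", "")
--     if not raw:
--         return ""
--     parts = raw.split("-")
--     if len(parts) > 2:
--         return ""
--     normed = [_norm_part(p) for p in parts]
--     if any(p is None for p in normed):
--         return ""
--     return "-".join(normed)
-- ===== Notes on version B (the rewrite author's own statement) =====
-- stated objective: alternative
-- what changed: Replaces A's per-character in_suffix state machine and accumulating outer loop with a two-phase decomposition per part: split at the first non-digit boundary into digit head and suffix, validate the suffix with an all(isalpha) predicate, then map a norm-part helper over the parts and join; constant-factor speedup because slicing and the short-circuiting all()/next() scans replace A's per-character Python-level branching and list appends.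
import Mathlib
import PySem

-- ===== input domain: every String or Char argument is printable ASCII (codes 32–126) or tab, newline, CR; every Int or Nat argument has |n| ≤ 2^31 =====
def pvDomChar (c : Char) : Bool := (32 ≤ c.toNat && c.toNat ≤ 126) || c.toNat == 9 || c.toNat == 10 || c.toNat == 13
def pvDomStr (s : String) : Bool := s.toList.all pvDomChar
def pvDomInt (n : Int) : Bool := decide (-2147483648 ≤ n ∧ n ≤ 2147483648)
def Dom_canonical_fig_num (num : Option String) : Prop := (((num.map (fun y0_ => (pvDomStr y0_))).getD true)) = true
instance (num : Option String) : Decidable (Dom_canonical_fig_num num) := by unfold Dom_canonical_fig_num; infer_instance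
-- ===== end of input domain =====

-- B replaces A's per-character in_suffix state machine by a digit-prefix/alpha-suffix
-- partition of each part with predicate validation, and a map over the parts instead of
-- an accumulating loop with early returns (objective: alternative decomposition).

-- ===== PORT A =====
-- the inner `for ch in part` loop of A, returning none on `return ""`
def pvPartLoopA : List Char → List Char → List Char → Bool → Option (List Char × List Char)
  | [], digits, suffix, _ => some (digits, suffix)
  | ch :: rest, digits, suffix, insuf =>
    if PySem.Chars.isdigit ch && !insuf then pvPartLoopA rest (digits ++ [ch]) suffix insuf
    else if PySem.Chars.isalpha ch then pvPartLoopA rest digits (suffix ++ [ch]) true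
    else none

-- one iteration of A's `for part in parts` body
def pvNormPartA (part : List Char) : Option (List Char) :=
  if part = [] then none
  else
    match pvPartLoopA part [] [] false with
    | none => none
    | some (digits, suffix) =>
      if digits = [] then none
      else
        -- `lstrip("0") or "0"` ported by hand: drop leading '0's (exact for this call)
        let np0 := digits.dropWhile (· == '0')
        let np := if np0 = [] then ['0'] else np0
        if 4 < np.length || 2 < suffix.length then none
        else some (np ++ suffix)

-- A's outer loop accumulating normalized_parts, none on any `return ""`
def pvPartsLoopA : List (List Char) → List (List Char) → Option (List (List Char))
  | [], acc => some acc
  | p :: rest, acc =>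
    match pvNormPartA p with
    | none => none
    | some v => pvPartsLoopA rest (acc ++ [v])

def canonical_fig_num (num : Option String) : String :=
  match num with
  | none => ""
  | some s =>
    if s = "" then ""
    else
      let raw := PySem.Chars.replace (PySem.Chars.upper (PySem.Chars.strip s.toList)) [' '] []
      if raw = [] then ""
      else
        let parts := PySem.Chars.splitOn raw ['-']
        if 2 < parts.length then ""
        else
          match pvPartsLoopA parts [] with
          | none => ""
          | some l => String.ofList (PySem.Chars.join ['-'] l)

-- ===== PORT B =====
-- B's _norm_part: split at the first non-digit, validate suffix with a predicate
def pvNormPartB (part : List Char) : Option (List Char) :=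
  let head := part.takeWhile PySem.Chars.isdigit
  let tail := part.dropWhile PySem.Chars.isdigit
  if head = [] || !(tail.all PySem.Chars.isalpha) then none
  else
    -- `lstrip("0") or "0"` ported by hand: drop leading '0's (exact for this call)
    let h0 := head.dropWhile (· == '0')
    let h := if h0 = [] then ['0'] else h0
    if 4 < h.length || 2 < tail.length then none
    else some (h ++ tail)

def canonical_fig_num_alt (num : Option String) : String :=
  match num with
  | none => ""
  | some s =>
    if s = "" then ""
    else
      let raw := PySem.Chars.replace (PySem.Chars.upper (PySem.Chars.strip s.toList)) [' '] []
      if raw = [] then ""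
      else
        let parts := PySem.Chars.splitOn raw ['-']
        if 2 < parts.length then ""
        else
          let normed := parts.map pvNormPartB
          if normed.contains none then ""
          else String.ofList (PySem.Chars.join ['-'] (normed.filterMap id))

-- ===== PRECONDITION & SPEC =====
def Spec_canonical_fig_num (num : Option String) (out : String) : Prop := out = canonical_fig_num_alt num
instance (num : Option String) (out : String) : Decidable (Spec_canonical_fig_num num out) := by unfold Spec_canonical_fig_num; infer_instance

-- ===== CLAIM (what is proved, stated in full; the proofs are below) =====
def Claim_equal_canonical_fig_num : Prop := ∀ (num : Option String), Dom_canonical_fig_num num → Spec_canonical_fig_num num (canonical_fig_num num)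

-- ===== LEMMAS AND PROOFS =====
theorem partLoopA_insuf (part digits suffix : List Char) :
    pvPartLoopA part digits suffix true =
      if part.all PySem.Chars.isalpha then some (digits, suffix ++ part) else none := by
  induction part generalizing suffix with
  | nil => simp [pvPartLoopA]
  | cons ch rest ih =>
    by_cases h : PySem.Chars.isalpha ch = true
    · simp [pvPartLoopA, h, ih]
    · simp [pvPartLoopA, h]

theorem partLoopA_start (part digits : List Char) :
    pvPartLoopA part digits [] false =
      if (part.dropWhile PySem.Chars.isdigit).all PySem.Chars.isalpha then
        some (digits ++ part.takeWhile PySem.Chars.isdigit, part.dropWhile PySem.Chars.isdigit)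
      else none := by
  induction part generalizing digits with
  | nil => simp [pvPartLoopA]
  | cons ch rest ih =>
    by_cases hd : PySem.Chars.isdigit ch = true
    · simp [pvPartLoopA, hd, ih, List.append_assoc]
    · by_cases ha : PySem.Chars.isalpha ch = true
      · simp [pvPartLoopA, hd, ha, partLoopA_insuf]
      · simp [pvPartLoopA, hd, ha]

theorem normPart_eq (part : List Char) : pvNormPartA part = pvNormPartB part := by
  unfold pvNormPartA pvNormPartB
  rcases eq_or_ne part [] with rfl | hne
  · simp
  · rw [if_neg hne, partLoopA_start]
    by_cases hall : (part.dropWhile PySem.Chars.isdigit).all PySem.Chars.isalpha = true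
    · simp only [hall, if_pos, List.nil_append]
      by_cases hh : part.takeWhile PySem.Chars.isdigit = []
      · simp [hh]
      · simp [hh]
    · simp [hall]

theorem partsLoop_eq (parts : List (List Char)) (acc : List (List Char)) :
    pvPartsLoopA parts acc =
      if (parts.map pvNormPartB).contains none then none
      else some (acc ++ (parts.map pvNormPartB).filterMap id) := by
  induction parts generalizing acc with
  | nil => simp [pvPartsLoopA]
  | cons p rest ih =>
    simp only [pvPartsLoopA, normPart_eq]
    cases hv : pvNormPartB p with
    | none => simp [hv]
    | some v => simp [hv, ih]

-- ===== VERDICT (by name: the statement is the Claim_ definition above) =====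
theorem canonical_fig_num_spec : Claim_equal_canonical_fig_num := by
  intro num _
  unfold Spec_canonical_fig_num canonical_fig_num canonical_fig_num_alt
  cases num with
  | none => rfl
  | some s =>
    by_cases hs : s = ""
    · simp [hs]
    · simp only [if_neg hs]
      by_cases h0 : PySem.Chars.replace (PySem.Chars.upper (PySem.Chars.strip s.toList)) [' '] [] = []
      · simp [h0]
      · simp only [if_neg h0]
        by_cases h2 : 2 < (PySem.Chars.splitOn (PySem.Chars.replace (PySem.Chars.upper (PySem.Chars.strip s.toList)) [' '] []) ['-']).length
        · simp [h2]
        · simp only [if_neg h2]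
          rw [partsLoop_eq]
          split_ifs <;> rfl
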